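-- pv_equiv track=rewrite | github.com/BioKT/MartiniSurf | martinisurf/gromacs_inputs.py | _infer_linker_restrained_atom_ids
-- ===== SOURCE A (Python) =====
-- from typing import Dict, List, Sequence
--
-- def _infer_linker_restrained_atom_ids(
--     pull_anchor_atoms: Dict[int, List[int]],
--     linker_atom_ids: set[int],
--     linker_size: int | None,
-- ) -> List[int]:
--     """
--     Infer linker-local atom indices to restrain from linker-tail pull groups.
--     Falls back to the last linker bead when mapping is unavailable.
--     """
--     if not linker_size or linker_size <= 0:
--         return []
--
--     tail_global_ids = sorted(
--         {
--             int(atoms[0])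
--             for gid, atoms in pull_anchor_atoms.items()
--             if gid % 3 == 0 and atoms
--         }
--     )
--     if not tail_global_ids:
--         return [linker_size]
--
--     linker_ids_sorted = sorted(int(i) for i in linker_atom_ids)
--     id_to_pos = {atom_id: idx for idx, atom_id in enumerate(linker_ids_sorted)}
--
--     local_ids: set[int] = set()
--     for tail_id in tail_global_ids:
--         pos = id_to_pos.get(tail_id)
--         if pos is None:
--             continue
--         local_ids.add((pos % linker_size) + 1)
--
--     return sorted(local_ids) if local_ids else [linker_size]
-- ===== SOURCE B (Python) =====
-- def _infer_linker_restrained_atom_ids(pull_anchor_atoms, linker_atom_ids, linker_size):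
--     if not linker_size or linker_size <= 0:
--         return []
--     tail_set = {
--         int(atoms[0])
--         for gid, atoms in pull_anchor_atoms.items()
--         if gid % 3 == 0 and atoms
--     }
--     if not tail_set:
--         return [linker_size]
--     local_ids = set()
--     for idx, aid in enumerate(sorted(int(i) for i in linker_atom_ids)):
--         if aid in tail_set:
--             local_ids.add((idx % linker_size) + 1)
--     return sorted(local_ids) if local_ids else [linker_size]
-- ===== Notes on version B (the rewrite author's own statement) =====
-- stated objective: simpler
-- what changed: B drops the id->position dict and the sorted tail list entirely: it keeps the tail ids only as a membership set and makes one enumerate pass over the sorted linker ids, collecting (idx % linker_size)+1 whenever the id is a tail id, instead of A's sort-tails-then-lookup-each-in-a-dict pass.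
import Mathlib
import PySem

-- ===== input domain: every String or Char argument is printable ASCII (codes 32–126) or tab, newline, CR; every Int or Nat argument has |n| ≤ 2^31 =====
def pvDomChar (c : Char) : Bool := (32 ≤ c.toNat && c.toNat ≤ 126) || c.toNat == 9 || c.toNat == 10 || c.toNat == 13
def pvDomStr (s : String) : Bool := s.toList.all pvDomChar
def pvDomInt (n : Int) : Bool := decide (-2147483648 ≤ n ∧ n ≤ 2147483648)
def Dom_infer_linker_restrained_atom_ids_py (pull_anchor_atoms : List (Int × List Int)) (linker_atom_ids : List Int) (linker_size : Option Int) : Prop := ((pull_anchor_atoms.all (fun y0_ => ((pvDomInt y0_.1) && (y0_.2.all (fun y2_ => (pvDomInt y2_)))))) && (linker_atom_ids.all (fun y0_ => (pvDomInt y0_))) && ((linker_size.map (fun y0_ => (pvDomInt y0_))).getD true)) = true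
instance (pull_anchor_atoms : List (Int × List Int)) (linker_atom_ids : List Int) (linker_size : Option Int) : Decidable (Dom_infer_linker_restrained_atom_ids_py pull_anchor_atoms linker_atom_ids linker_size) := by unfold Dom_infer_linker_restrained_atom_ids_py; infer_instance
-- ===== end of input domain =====

-- B replaces A's tail-id sort + id->position dict with a single membership set and one
-- enumerate pass over the sorted linker ids (objective: simpler).

-- ===== PORT A =====
-- A-side helper: the set comprehension {int(atoms[0]) for gid, atoms in ... if gid % 3 == 0 and atoms}
def pyA_tailSet (pull_anchor_atoms : List (Int × List Int)) : PySem.Set Int :=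
  pull_anchor_atoms.foldl
    (fun s p => if PySem.Int.mod p.1 3 = 0 ∧ p.2 ≠ [] then PySem.Set.add s p.2.headI else s)
    PySem.Set.empty

-- A-side helper: id_to_pos = {atom_id: idx for idx, atom_id in enumerate(linker_ids_sorted)}
def pyA_idToPos (linker_ids_sorted : List Int) : PySem.Dict Int Int :=
  (PySem.List.enumerate linker_ids_sorted).foldl
    (fun d p => d.insert p.2 p.1) PySem.Dict.empty

-- A-side helper: the 'for tail_id in tail_global_ids' loop filling local_ids
def pyA_localIds (tail_global_ids : List Int) (id_to_pos : PySem.Dict Int Int) (L : Int) : PySem.Set Int :=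
  tail_global_ids.foldl
    (fun s t =>
      match id_to_pos.get? t with
      | none => s
      | some pos => PySem.Set.add s (PySem.Int.mod pos L + 1))
    PySem.Set.empty

def infer_linker_restrained_atom_ids_py (pull_anchor_atoms : List (Int × List Int)) (linker_atom_ids : List Int) (linker_size : Option Int) : List Int :=
  match linker_size with
  | none => []
  | some L =>
    if L ≤ 0 then []
    else if PySem.List.sorted (pyA_tailSet pull_anchor_atoms) (fun x => x) false = [] then [L]
    else if pyA_localIds (PySem.List.sorted (pyA_tailSet pull_anchor_atoms) (fun x => x) false)
              (pyA_idToPos (PySem.List.sorted linker_atom_ids (fun x => x) false)) L = [] then [L]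
    else PySem.List.sorted
          (pyA_localIds (PySem.List.sorted (pyA_tailSet pull_anchor_atoms) (fun x => x) false)
            (pyA_idToPos (PySem.List.sorted linker_atom_ids (fun x => x) false)) L)
          (fun x => x) false

-- ===== PORT B =====
-- B-side helper: tail_set (same comprehension as A's, kept unsorted, used only for membership)
def pyB_tailSet (pull_anchor_atoms : List (Int × List Int)) : PySem.Set Int :=
  pull_anchor_atoms.foldl
    (fun s p => if PySem.Int.mod p.1 3 = 0 ∧ p.2 ≠ [] then PySem.Set.add s p.2.headI else s)
    PySem.Set.empty

-- B-side helper: 'for idx, aid in enumerate(sorted(...)): if aid in tail_set: local_ids.add(...)'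
def pyB_localIds (linker_atom_ids : List Int) (tail_set : PySem.Set Int) (L : Int) : PySem.Set Int :=
  (PySem.List.enumerate (PySem.List.sorted linker_atom_ids (fun x => x) false)).foldl
    (fun s p => if p.2 ∈ tail_set then PySem.Set.add s (PySem.Int.mod p.1 L + 1) else s)
    PySem.Set.empty

def infer_linker_restrained_atom_ids_py_alt (pull_anchor_atoms : List (Int × List Int)) (linker_atom_ids : List Int) (linker_size : Option Int) : List Int :=
  match linker_size with
  | none => []
  | some L =>
    if L ≤ 0 then []
    else if pyB_tailSet pull_anchor_atoms = [] then [L]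
    else if pyB_localIds linker_atom_ids (pyB_tailSet pull_anchor_atoms) L = [] then [L]
    else PySem.List.sorted (pyB_localIds linker_atom_ids (pyB_tailSet pull_anchor_atoms) L) (fun x => x) false
-- ===== PRECONDITION & SPEC =====
-- linker_atom_ids is typed set[int] in the Python source; Pre_ requires the list encoding it to hold
-- distinct elements — a duplicate-bearing list does not encode a Python set, and on such lists A's
-- dict overwrite (keeping the last index of a duplicate) is an accident of its implementation.
def Pre_infer_linker_restrained_atom_ids_py (pull_anchor_atoms : List (Int × List Int)) (linker_atom_ids : List Int) (linker_size : Option Int) : Prop :=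
  linker_atom_ids.Nodup
instance (pull_anchor_atoms : List (Int × List Int)) (linker_atom_ids : List Int) (linker_size : Option Int) : Decidable (Pre_infer_linker_restrained_atom_ids_py pull_anchor_atoms linker_atom_ids linker_size) := by unfold Pre_infer_linker_restrained_atom_ids_py; infer_instance

def pvWitness_infer_linker_restrained_atom_ids_py : (List (Int × List Int)) × List Int × Option Int :=
  ([(0, [5]), (1, [7]), (3, [6])], [5, 6, 7], some 2)

def Spec_infer_linker_restrained_atom_ids_py (pull_anchor_atoms : List (Int × List Int)) (linker_atom_ids : List Int) (linker_size : Option Int) (out : List Int) : Prop := out = infer_linker_restrained_atom_ids_py_alt pull_anchor_atoms linker_atom_ids linker_size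
instance (pull_anchor_atoms : List (Int × List Int)) (linker_atom_ids : List Int) (linker_size : Option Int) (out : List Int) : Decidable (Spec_infer_linker_restrained_atom_ids_py pull_anchor_atoms linker_atom_ids linker_size out) := by unfold Spec_infer_linker_restrained_atom_ids_py; infer_instance

-- ===== CLAIM (what is proved, stated in full; the proofs are below) =====
def Claim_equal_infer_linker_restrained_atom_ids_py : Prop := ∀ (pull_anchor_atoms : List (Int × List Int)) (linker_atom_ids : List Int) (linker_size : Option Int), Dom_infer_linker_restrained_atom_ids_py pull_anchor_atoms linker_atom_ids linker_size → Pre_infer_linker_restrained_atom_ids_py pull_anchor_atoms linker_atom_ids linker_size → Spec_infer_linker_restrained_atom_ids_py pull_anchor_atoms linker_atom_ids linker_size (infer_linker_restrained_atom_ids_py pull_anchor_atoms linker_atom_ids linker_size)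

-- ===== LEMMAS AND PROOFS =====

-- Generic: a fold that conditionally adds an (optional) element to a PySem.Set keeps it Nodup …
theorem pyNodup_foldl_addOpt {α β : Type} [BEq α] [LawfulBEq α] (g : β → Option α) :
    ∀ (l : List β) (s : List α), s.Nodup →
      (l.foldl (fun s b => (g b).elim s (fun v => PySem.Set.add s v)) s).Nodup := by
  intro l
  induction l with
  | nil => intro s h; simpa using h
  | cons b t ih =>
    intro s h
    simp only [List.foldl_cons]
    cases hg : g b with
    | none => simpa [hg, Option.elim_none] using ih s h
    | some v => simpa [hg, Option.elim_some] using ih _ (PySem.Set.nodup_add s v h)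

-- … and its members are the initial ones plus every emitted element.
theorem pyMem_foldl_addOpt {α β : Type} [BEq α] [LawfulBEq α] (g : β → Option α) :
    ∀ (l : List β) (s : List α) (x : α),
      (x ∈ l.foldl (fun s b => (g b).elim s (fun v => PySem.Set.add s v)) s) ↔
        x ∈ s ∨ ∃ b ∈ l, g b = some x := by
  intro l
  induction l with
  | nil => intro s x; simp
  | cons b t ih =>
    intro s x
    simp only [List.foldl_cons]
    cases hg : g b with
    | none =>
      simp only [Option.elim_none, ih, List.mem_cons]
      constructor
      · rintro (h | ⟨c, hc, hgc⟩)
        · exact Or.inl h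
        · exact Or.inr ⟨c, Or.inr hc, hgc⟩
      · rintro (h | ⟨c, (rfl | hc), hgc⟩)
        · exact Or.inl h
        · exact absurd hgc (by simp [hg])
        · exact Or.inr ⟨c, hc, hgc⟩
    | some v =>
      simp only [Option.elim_some, ih, PySem.Set.mem_add, List.mem_cons]
      constructor
      · rintro ((h | rfl) | ⟨c, hc, hgc⟩)
        · exact Or.inl h
        · exact Or.inr ⟨b, Or.inl rfl, hg⟩
        · exact Or.inr ⟨c, Or.inr hc, hgc⟩
      · rintro (h | ⟨c, (rfl | hc), hgc⟩)
        · exact Or.inl (Or.inl h)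
        · exact Or.inl (Or.inr (by simpa [hg] using hgc.symm))
        · exact Or.inr ⟨c, hc, hgc⟩

-- A's per-tail step is the addOpt shape with g t = (id_to_pos.get? t).map (pos ↦ pos % L + 1).
theorem pyA_localIds_eq (tails : List Int) (d : PySem.Dict Int Int) (L : Int) :
    pyA_localIds tails d L =
      tails.foldl
        (fun s t => ((d.get? t).map (fun pos => PySem.Int.mod pos L + 1)).elim s
                      (fun v => PySem.Set.add s v))
        PySem.Set.empty := by
  unfold pyA_localIds
  congr 1
  funext s t
  cases d.get? t <;> rfl

-- B's per-position step is the addOpt shape with g p = if p.2 ∈ tail_set then some (p.1 % L + 1) else none.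
theorem pyB_localIds_eq (lai : List Int) (T : PySem.Set Int) (L : Int) :
    pyB_localIds lai T L =
      (PySem.List.enumerate (PySem.List.sorted lai (fun x => x) false)).foldl
        (fun s p => ((if p.2 ∈ T then some (PySem.Int.mod p.1 L + 1) else none) : Option Int).elim s
                      (fun v => PySem.Set.add s v))
        PySem.Set.empty := by
  unfold pyB_localIds
  congr 1
  funext s p
  by_cases h : p.2 ∈ T <;> simp [h]

-- The id_to_pos dictionary, built over enumerate of a Nodup list, looks up exactly the enumerate pairs.
theorem pyIdToPos_get? (ls : List Int) (hnd : ls.Nodup) (t pos : Int) :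
    (pyA_idToPos ls).get? t = some pos ↔ (pos, t) ∈ PySem.List.enumerate ls := by
  have hkeys : ((PySem.List.enumerate ls).map (fun p : Int × Int => p.2)).Nodup := by
    rw [PySem.List.map_snd_enumerate]; exact hnd
  have hitems : (pyA_idToPos ls).items =
      (PySem.List.enumerate ls).map (fun p : Int × Int => (p.2, p.1)) := by
    unfold pyA_idToPos
    have := PySem.Dict.items_foldl_insert_fresh (PySem.List.enumerate ls)
      (fun p : Int × Int => p.2) (fun p : Int × Int => p.1) PySem.Dict.empty
      (by intro a _; simp [PySem.Dict.contains_empty]) hkeys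
    simpa using this
  have hknd : (pyA_idToPos ls).keys.Nodup := by
    have hk : (pyA_idToPos ls).keys =
        ((PySem.List.enumerate ls).map (fun p : Int × Int => (p.2, p.1))).map Prod.fst := by
      simp [PySem.Dict.keys, hitems]
    rw [hk, List.map_map]
    have hcomp : (Prod.fst ∘ fun p : Int × Int => (p.2, p.1)) = (fun p : Int × Int => p.2) := rfl
    rw [hcomp]; exact hkeys
  rw [PySem.Dict.get?_eq_some_iff_mem_items _ t pos hknd, hitems, List.mem_map]
  constructor
  · rintro ⟨q, hq, hEq⟩
    have h1 : q.2 = t := congrArg Prod.fst hEq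
    have h2 : q.1 = pos := congrArg Prod.snd hEq
    have hq' : q = (pos, t) := Prod.ext h2 h1
    rwa [hq'] at hq
  · intro h
    exact ⟨(pos, t), h, rfl⟩

-- ===== VERDICT (by name: the statement is the Claim_ definition above) =====
theorem infer_linker_restrained_atom_ids_py_spec : Claim_equal_infer_linker_restrained_atom_ids_py := by
  intro paa lai ls _hdom hpre
  unfold Spec_infer_linker_restrained_atom_ids_py
  unfold infer_linker_restrained_atom_ids_py infer_linker_restrained_atom_ids_py_alt
  cases ls with
  | none => rfl
  | some L =>
    by_cases hL : L ≤ 0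
    · simp [hL]
    simp only [if_neg hL]
    have hTT : pyB_tailSet paa = pyA_tailSet paa := rfl
    by_cases hTe : pyA_tailSet paa = []
    · simp [hTe, hTT, PySem.List.sorted_eq_nil_iff]
    have hsTe : ¬ PySem.List.sorted (pyA_tailSet paa) (fun x => x) false = [] := by
      simpa [PySem.List.sorted_eq_nil_iff] using hTe
    have hTe' : ¬ pyB_tailSet paa = [] := by rw [hTT]; exact hTe
    simp only [if_neg hsTe, if_neg hTe']
    -- core: the two local-id sets have the same members
    have hlsnd : (PySem.List.sorted lai (fun x => x) false).Nodup :=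
      (PySem.List.sorted_perm lai (fun x => x) false).nodup_iff.mpr hpre
    have hmem : ∀ x : Int,
        x ∈ pyA_localIds (PySem.List.sorted (pyA_tailSet paa) (fun x => x) false)
              (pyA_idToPos (PySem.List.sorted lai (fun x => x) false)) L ↔
        x ∈ pyB_localIds lai (pyB_tailSet paa) L := by
      intro x
      rw [pyA_localIds_eq, pyB_localIds_eq,
        pyMem_foldl_addOpt
          (fun t => ((pyA_idToPos (PySem.List.sorted lai (fun x => x) false)).get? t).map
            (fun pos => PySem.Int.mod pos L + 1)),
        pyMem_foldl_addOpt
          (fun p : Int × Int => if p.2 ∈ pyB_tailSet paa then some (PySem.Int.mod p.1 L + 1) else none)]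
      simp only [PySem.Set.empty, List.not_mem_nil, false_or]
      constructor
      · rintro ⟨t, ht, hgt⟩
        rcases Option.map_eq_some_iff.mp hgt with ⟨pos, hget, hx⟩
        refine ⟨(pos, t), (pyIdToPos_get? _ hlsnd t pos).mp hget, ?_⟩
        have htT : t ∈ pyB_tailSet paa := by
          rw [hTT]
          exact (PySem.List.mem_sorted (pyA_tailSet paa) (fun x => x) false t).mp ht
        simp [htT, hx]
      · rintro ⟨p, hp, hgp⟩
        by_cases hmemT : p.2 ∈ pyB_tailSet paa
        · refine ⟨p.2, ?_, ?_⟩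
          · rw [PySem.List.mem_sorted, ← hTT]; exact hmemT
          · have hget : (pyA_idToPos (PySem.List.sorted lai (fun x => x) false)).get? p.2 = some p.1 :=
              (pyIdToPos_get? _ hlsnd p.2 p.1).mpr (by simpa using hp)
            rw [hget]
            simpa [hmemT] using hgp
        · simp [hmemT] at hgp
    have hndA : (pyA_localIds (PySem.List.sorted (pyA_tailSet paa) (fun x => x) false)
        (pyA_idToPos (PySem.List.sorted lai (fun x => x) false)) L).Nodup := by
      rw [pyA_localIds_eq]
      exact pyNodup_foldl_addOpt _ _ _ List.nodup_nil
    have hndB : (pyB_localIds lai (pyB_tailSet paa) L).Nodup := by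
      rw [pyB_localIds_eq]
      exact pyNodup_foldl_addOpt _ _ _ List.nodup_nil
    have hperm : (pyA_localIds (PySem.List.sorted (pyA_tailSet paa) (fun x => x) false)
        (pyA_idToPos (PySem.List.sorted lai (fun x => x) false)) L).Perm
        (pyB_localIds lai (pyB_tailSet paa) L) :=
      (List.perm_ext_iff_of_nodup hndA hndB).mpr hmem
    by_cases hAe : pyA_localIds (PySem.List.sorted (pyA_tailSet paa) (fun x => x) false)
        (pyA_idToPos (PySem.List.sorted lai (fun x => x) false)) L = []
    · have hBe : pyB_localIds lai (pyB_tailSet paa) L = [] := by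
        rw [hAe] at hperm; exact hperm.symm.eq_nil
      rw [if_pos hAe, if_pos hBe]
    · have hBe : ¬ pyB_localIds lai (pyB_tailSet paa) L = [] := by
        intro h; rw [h] at hperm; exact hAe hperm.eq_nil
      rw [if_neg hAe, if_neg hBe]
      exact (PySem.List.sorted_id_eq_sorted_id_iff_perm _ _).mpr hperm
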